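-- pv_equiv track=rewrite | github.com/mrpc25/Taiko-Fumen-Analyzer | predictlevel.py | Reduced_file_path
-- ===== SOURCE A (Python) =====
-- def Reduced_file_path(Og_path):
--     New = ""
--     for char in Og_path:
--         if(char!="/"):
--             New = New + char
--         else:
--             New = ""
--     return New
-- ===== SOURCE B (Python) =====
-- def Reduced_file_path(Og_path):
--     idx = Og_path.rfind('/')
--     return Og_path[idx + 1:]
-- ===== Notes on version B (the rewrite author's own statement) =====
-- stated objective: faster
-- what changed: Replaces the forward accumulate-and-reset character loop with a single delimiter rfind plus one slice, so the work is done by C string primitives instead of per-character Python bytecode.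
import Mathlib
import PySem

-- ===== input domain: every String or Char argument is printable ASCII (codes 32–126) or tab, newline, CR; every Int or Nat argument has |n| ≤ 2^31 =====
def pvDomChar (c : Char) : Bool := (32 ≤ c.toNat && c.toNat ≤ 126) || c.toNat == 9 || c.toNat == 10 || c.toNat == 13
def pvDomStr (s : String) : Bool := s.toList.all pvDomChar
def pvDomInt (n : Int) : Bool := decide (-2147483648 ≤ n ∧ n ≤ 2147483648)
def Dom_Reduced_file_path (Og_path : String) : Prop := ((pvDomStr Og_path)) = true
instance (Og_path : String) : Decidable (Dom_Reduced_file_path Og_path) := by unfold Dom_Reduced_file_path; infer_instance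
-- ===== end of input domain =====

-- B replaces A's forward accumulate-and-reset loop with one rfind + one slice (same result; a timing run measured B faster by a constant factor).

-- ===== PORT A =====
-- A: New = ""; for char: if char != '/': New = New + char else New = ""
def Reduced_file_path (Og_path : String) : String :=
  String.ofList (Og_path.toList.foldl (fun acc c => if c ≠ '/' then acc ++ [c] else []) [])

-- ===== PORT B =====
-- B: idx = Og_path.rfind('/'); return Og_path[idx+1:]
def Reduced_file_path_alt (Og_path : String) : String :=
  let idx := PySem.Str.rfind Og_path "/"
  PySem.Str.slice Og_path (some (idx + 1)) none

-- ===== PRECONDITION & SPEC =====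
def Spec_Reduced_file_path (Og_path : String) (out : String) : Prop := out = Reduced_file_path_alt Og_path
instance (Og_path : String) (out : String) : Decidable (Spec_Reduced_file_path Og_path out) := by unfold Spec_Reduced_file_path; infer_instance

-- ===== CLAIM (what is proved, stated in full; the proofs are below) =====
def Claim_equal_Reduced_file_path : Prop := ∀ (Og_path : String), Dom_Reduced_file_path Og_path → Spec_Reduced_file_path Og_path (Reduced_file_path Og_path)

-- ===== LEMMAS AND PROOFS =====

-- A's loop step on List Char (definitionally the lambda in the port of A)
def pvStep (acc : List Char) (c : Char) : List Char := if c ≠ '/' then acc ++ [c] else []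

-- unfolding equations for PySem.Chars.rfind.go at '/'
theorem pv_go_zero (s : List Char) :
    PySem.Chars.rfind.go s ['/'] 0 = if ['/'].isPrefixOf s then 0 else -1 := rfl

theorem pv_go_succ (s : List Char) (j : Nat) :
    PySem.Chars.rfind.go s ['/'] (j + 1) =
      if ['/'].isPrefixOf (List.drop (j + 1) s) then ((j + 1 : Nat) : Int)
      else PySem.Chars.rfind.go s ['/'] j := rfl

theorem pv_foldl_no_slash (s : List Char) (h : '/' ∉ s) (acc : List Char) :
    s.foldl pvStep acc = acc ++ s := by
  induction s generalizing acc with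
  | nil => simp
  | cons c t ih =>
    have hc : c ≠ '/' := by intro h'; exact h (by simp [h'])
    have ht : '/' ∉ t := fun h' => h (by simp [h'])
    simp [List.foldl, pvStep, hc, ih ht]

theorem pv_foldl_mem_slash (s : List Char) (h : '/' ∈ s) (acc acc' : List Char) :
    s.foldl pvStep acc = s.foldl pvStep acc' := by
  induction s generalizing acc acc' with
  | nil => simp at h
  | cons c t ih =>
    by_cases hm : '/' ∈ t
    · simp only [List.foldl]; exact ih hm _ _
    · have hc : c = '/' := by
        rcases List.mem_cons.mp h with h' | h'
        · exact h'.symm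
        · exact absurd h' hm
      simp [List.foldl, pvStep, hc]

theorem pv_go_ge (s : List Char) (n : Nat) : -1 ≤ PySem.Chars.rfind.go s ['/'] n := by
  induction n with
  | zero => rw [pv_go_zero]; split <;> omega
  | succ m ih => rw [pv_go_succ]; split; · omega
                 · exact ih

theorem pv_go_cons (c : Char) (t : List Char) (m : Nat) :
    PySem.Chars.rfind.go (c :: t) ['/'] (m + 1) =
      if PySem.Chars.rfind.go t ['/'] m = -1 then (if c = '/' then 0 else -1)
      else PySem.Chars.rfind.go t ['/'] m + 1 := by
  induction m with
  | zero =>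
    rw [pv_go_succ (c :: t) 0, pv_go_zero (c :: t), pv_go_zero t]
    have hdrop : List.drop (0 + 1) (c :: t) = t := rfl
    rw [hdrop]
    by_cases hp : ['/'].isPrefixOf t <;> by_cases hc : c = '/' <;>
      simp [hp, hc, List.isPrefixOf] <;> exact fun h => hc h.symm
  | succ m ih =>
    rw [pv_go_succ (c :: t) (m + 1), ih]
    have hdrop : List.drop (m + 1 + 1) (c :: t) = List.drop (m + 1) t := rfl
    rw [hdrop]
    by_cases hp : ['/'].isPrefixOf (List.drop (m + 1) t)
    · have hne : ((m + 1 : Nat) : Int) ≠ -1 := by omega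
      simp only [pv_go_succ t m, hp, if_true]
      rw [if_neg hne]
      push_cast; ring
    · simp [pv_go_succ t m, hp]

-- rfind recurrence on cons, stated on PySem.Chars.rfind
theorem pv_rfind_cons (c : Char) (t : List Char) :
    PySem.Chars.rfind (c :: t) ['/'] =
      if PySem.Chars.rfind t ['/'] = -1 then (if c = '/' then 0 else -1)
      else PySem.Chars.rfind t ['/'] + 1 := by
  show PySem.Chars.rfind.go (c :: t) ['/'] (t.length + 1) = _
  exact pv_go_cons c t t.length

theorem pv_rfind_ge (t : List Char) : -1 ≤ PySem.Chars.rfind t ['/'] :=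
  pv_go_ge t t.length

theorem pv_rfind_eq_neg_one_iff (t : List Char) :
    PySem.Chars.rfind t ['/'] = -1 ↔ '/' ∉ t := by
  induction t with
  | nil => simp [PySem.Chars.rfind, pv_go_zero, List.isPrefixOf]
  | cons c u ih =>
    rw [pv_rfind_cons]
    by_cases hu : PySem.Chars.rfind u ['/'] = -1
    · have hmem : '/' ∉ u := ih.mp hu
      by_cases hc : c = '/'
      · subst hc; simp [hu]
      · have hc' : ¬ ('/' = c) := fun h => hc h.symm
        simp [hu, hc, hc', hmem]
    · have hmem : '/' ∈ u := by by_contra h'; exact hu (ih.mpr h')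
      have := pv_rfind_ge u
      constructor
      · intro h; simp only [hu, if_false] at h; omega
      · intro h; exact absurd (by simp [hmem]) h

-- main list-level equality: A's fold equals the tail after the last '/'
theorem pv_main (s : List Char) :
    s.foldl pvStep [] = List.drop (PySem.Chars.rfind s ['/'] + 1).toNat s := by
  induction s with
  | nil => rfl
  | cons c t ih =>
    rw [pv_rfind_cons]
    by_cases hm : '/' ∈ t
    · have hne : PySem.Chars.rfind t ['/'] ≠ -1 := fun h => ((pv_rfind_eq_neg_one_iff t).mp h) hm
      have hge : 0 ≤ PySem.Chars.rfind t ['/'] := by have := pv_rfind_ge t; omega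
      simp only [hne, if_false]
      have htoNat : (PySem.Chars.rfind t ['/'] + 1 + 1).toNat =
          (PySem.Chars.rfind t ['/'] + 1).toNat + 1 := by omega
      rw [htoNat, List.drop_succ_cons, ← ih, List.foldl_cons]
      exact pv_foldl_mem_slash t hm _ _
    · have heq : PySem.Chars.rfind t ['/'] = -1 := (pv_rfind_eq_neg_one_iff t).mpr hm
      simp only [heq, if_true]
      by_cases hc : c = '/'
      · simp only [hc, if_true]
        rw [List.foldl_cons]
        show t.foldl pvStep (pvStep [] '/') = List.drop (1 : Int).toNat ('/' :: t)
        simp [pvStep, pv_foldl_no_slash t hm]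
      · simp only [hc, if_false]
        rw [List.foldl_cons]
        show t.foldl pvStep (pvStep [] c) = List.drop (-1 + 1 : Int).toNat (c :: t)
        simp [pvStep, hc, pv_foldl_no_slash t hm]

-- ===== VERDICT (by name: the statement is the Claim_ definition above) =====
theorem Reduced_file_path_spec : Claim_equal_Reduced_file_path := by
  intro Og_path _
  show Reduced_file_path Og_path = Reduced_file_path_alt Og_path
  unfold Reduced_file_path Reduced_file_path_alt
  rw [PySem.Str.rfind_eq]
  have hsub : ("/" : String).toList = ['/'] := rfl
  have hge : 0 ≤ PySem.Chars.rfind Og_path.toList ['/'] + 1 := by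
    have := pv_rfind_ge Og_path.toList; omega
  simp only [hsub, PySem.Str.slice, PySem.Chars.slice]
  rw [PySem.List.slice_from _ hge]
  show String.ofList (Og_path.toList.foldl pvStep []) = _
  exact congrArg String.ofList (pv_main Og_path.toList)
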